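-- pv_equiv track=rewrite | github.com/gabriellaec/desoft-analise-exercicios | backup/user_258/ch51_2019_04_03_13_56_12_736303.py | estritamente_crescente
-- ===== SOURCE A (Python) =====
-- def estritamente_crescente(lista):
--     cresc=[]
--     if lista==[]:
--         cresc=cresc
--     i=1
--     u=0
--     while i<len(lista):
--         while lista[u]<lista[i]:
--             u+=1
--         if u==i:
--             cresc.append(lista[i])
--         i+=1
--     return cresc
-- ===== SOURCE B (Python) =====
-- def estritamente_crescente(lista):
--     if not lista:
--         return []
--     m = lista[0]
--     cresc = []
--     for x in lista[1:]:
--         if m < x: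
--             cresc.append(x)
--             m = x
--     return cresc
-- ===== Notes on version B (the rewrite author's own statement) =====
-- stated objective: simpler
-- what changed: Replaces the two-index scheme (a second cursor u advanced by an inner while loop to test whether it can reach i) by a single pass keeping a running maximum m, appending x exactly when m < x.
import Mathlib
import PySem

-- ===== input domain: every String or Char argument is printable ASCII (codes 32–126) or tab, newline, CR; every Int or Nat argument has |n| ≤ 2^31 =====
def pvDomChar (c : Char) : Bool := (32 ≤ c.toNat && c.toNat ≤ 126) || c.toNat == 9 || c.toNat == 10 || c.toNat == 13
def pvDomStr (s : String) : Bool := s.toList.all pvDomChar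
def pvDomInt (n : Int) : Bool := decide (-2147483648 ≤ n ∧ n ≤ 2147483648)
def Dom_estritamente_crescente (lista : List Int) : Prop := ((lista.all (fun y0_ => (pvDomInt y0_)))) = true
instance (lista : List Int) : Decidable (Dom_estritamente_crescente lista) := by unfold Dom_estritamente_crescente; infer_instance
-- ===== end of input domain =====

-- B replaces A's two-index inner-while scheme with a single pass keeping a running maximum (simpler).


-- ===== PORT A =====
-- inner `while lista[u] < lista[i]: u += 1`; the bounds check only makes the
-- recursion total (Python never goes out of range here, since u stops at i).
def pvInner (lista : List Int) (xi : Int) (u : Nat) : Nat :=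
  if h : u < lista.length then
    if lista[u]'h < xi then pvInner lista xi (u + 1) else u
  else u
termination_by lista.length - u
decreasing_by omega

-- outer `while i < len(lista)` with state (i, u, cresc)
def pvOuter (lista : List Int) (i u : Nat) (cresc : List Int) : List Int :=
  if h : i < lista.length then
    pvOuter lista (i + 1) (pvInner lista (lista[i]'h) u)
      (if pvInner lista (lista[i]'h) u = i then cresc ++ [lista[i]'h] else cresc)
  else cresc
termination_by lista.length - i

def estritamente_crescente (lista : List Int) : List Int :=
  pvOuter lista 1 0 []

-- ===== PORT B =====
def estritamente_crescente_alt (lista : List Int) : List Int :=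
  match lista with
  | [] => []
  | x :: xs =>
    (xs.foldl (fun (s : Int × List Int) y => if s.1 < y then (y, s.2 ++ [y]) else s) (x, [])).2

-- ===== PRECONDITION & SPEC =====
def Spec_estritamente_crescente (lista : List Int) (out : List Int) : Prop := out = estritamente_crescente_alt lista
instance (lista : List Int) (out : List Int) : Decidable (Spec_estritamente_crescente lista out) := by unfold Spec_estritamente_crescente; infer_instance

-- ===== CLAIM (what is proved, stated in full; the proofs are below) =====
def Claim_equal_estritamente_crescente : Prop := ∀ (lista : List Int), Dom_estritamente_crescente lista → Spec_estritamente_crescente lista (estritamente_crescente lista)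

-- ===== LEMMAS AND PROOFS =====

-- functional version of B's fold step, returning (final max, appended list)
def pvF (m : Int) : List Int → Int × List Int
  | [] => (m, [])
  | y :: ys => if m < y then ((pvF y ys).1, y :: (pvF y ys).2) else pvF m ys

theorem pvF_foldl (ys : List Int) : ∀ (m : Int) (acc : List Int),
    ys.foldl (fun (s : Int × List Int) y => if s.1 < y then (y, s.2 ++ [y]) else s) (m, acc)
      = ((pvF m ys).1, acc ++ (pvF m ys).2) := by
  induction ys with
  | nil => intro m acc; simp [pvF]
  | cons y ys ih =>
    intro m acc
    by_cases h : m < y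
    · simp [pvF, h, List.foldl_cons, ih]
    · simp [pvF, h, List.foldl_cons, ih]

theorem pvInner_stop (lista : List Int) (xi : Int) (u : Nat)
    (h : ∀ (h' : u < lista.length), ¬ lista[u]'h' < xi) :
    pvInner lista xi u = u := by
  rw [pvInner]
  split
  · rename_i h'
    rw [if_neg (h h')]
  · rfl

theorem pvInner_reach (lista : List Int) (i : Nat) (hi : i < lista.length) :
    ∀ n u, i - u ≤ n → u ≤ i →
    (∀ j (hj : j < lista.length), u ≤ j → j < i → lista[j]'hj < lista[i]'hi) →
    pvInner lista (lista[i]'hi) u = i := by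
  intro n
  induction n with
  | zero =>
    intro u hn hu hall
    have : u = i := by omega
    subst this
    apply pvInner_stop
    intro h'
    exact lt_irrefl _
  | succ n ih =>
    intro u hn hu hall
    rcases Nat.lt_or_ge u i with hlt | hge
    · rw [pvInner]
      have hul : u < lista.length := Nat.lt_trans hlt hi
      rw [dif_pos hul, if_pos (hall u hul (Nat.le_refl u) hlt)]
      exact ih (u + 1) (by omega) (by omega) (fun j hj h1 h2 => hall j hj (by omega) h2)
    · have : u = i := by omega
      subst this
      apply pvInner_stop
      intro h'
      exact lt_irrefl _

theorem pvOuter_eq (lista : List Int) : ∀ n i u (cresc : List Int)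
    (hn : lista.length - i ≤ n)
    (hu : u < i) (hul : u < lista.length)
    (hinv : ∀ j (hj : j < lista.length), j < i → lista[j]'hj ≤ lista[u]'hul),
    pvOuter lista i u cresc = cresc ++ (pvF (lista[u]'hul) (lista.drop i)).2 := by
  intro n
  induction n with
  | zero =>
    intro i u cresc hn hu hul hinv
    rw [pvOuter, dif_neg (by omega)]
    rw [List.drop_eq_nil_of_le (by omega)]
    simp [pvF]
  | succ n ih =>
    intro i u cresc hn hu hul hinv
    by_cases hi : i < lista.length
    · rw [pvOuter, dif_pos hi]
      have hdrop : lista.drop i = lista[i]'hi :: lista.drop (i + 1) :=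
        List.drop_eq_getElem_cons hi
      by_cases hcase : lista[u]'hul < lista[i]'hi
      · -- inner loop runs all the way to i, element appended
        have hreach : pvInner lista (lista[i]'hi) u = i := by
          apply pvInner_reach lista i hi (i - u) u (Nat.le_refl _) (Nat.le_of_lt hu)
          intro j hj h1 h2
          exact lt_of_le_of_lt (hinv j hj h2) hcase
        rw [hreach, if_pos rfl]
        rw [ih (i + 1) i (cresc ++ [lista[i]'hi]) (by omega) (by omega) hi ?_]
        · rw [hdrop]
          simp [pvF, hcase, List.append_assoc]
        · intro j hj hji
          rcases Nat.lt_or_ge j i with h | h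
          · exact le_of_lt (lt_of_le_of_lt (hinv j hj h) hcase)
          · have : j = i := by omega
            subst this; exact le_refl _
      · -- inner loop does not move: u' = u ≠ i, element skipped
        have hstop : pvInner lista (lista[i]'hi) u = u := by
          apply pvInner_stop
          intro h'
          exact hcase
        rw [hstop, if_neg (by omega : ¬ u = i)]
        rw [ih (i + 1) u cresc (by omega) (by omega) hul ?_]
        · rw [hdrop]
          simp [pvF, hcase]
        · intro j hj hji
          rcases Nat.lt_or_ge j i with h | h
          · exact hinv j hj h
          · have : j = i := by omega
            subst this; exact le_of_not_gt hcase
    · rw [pvOuter, dif_neg hi]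
      rw [List.drop_eq_nil_of_le (by omega)]
      simp [pvF]

-- ===== VERDICT (by name: the statement is the Claim_ definition above) =====
theorem estritamente_crescente_spec : Claim_equal_estritamente_crescente := by
  intro lista _
  unfold Spec_estritamente_crescente estritamente_crescente
  cases lista with
  | nil => rw [pvOuter]; simp [estritamente_crescente_alt]
  | cons x xs =>
    rw [pvOuter_eq (x :: xs) (x :: xs).length 1 0 [] (by omega) (by omega)
      (by simp) (by intro j hj hji; interval_cases j; simp)]
    show [] ++ (pvF ((x :: xs)[0]'(by simp)) ((x :: xs).drop 1)).2
        = (xs.foldl (fun (s : Int × List Int) y => if s.1 < y then (y, s.2 ++ [y]) else s) (x, [])).2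
    rw [pvF_foldl]
    simp
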